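-- pv_equiv track=rewrite | github.com/oimodeler/oimodeler | bump_version.py | detect_bump_level
-- ===== SOURCE A (Python) =====
-- def detect_bump_level(commits):
--     """
--     Règles :
--     - MAJOR: → MAJOR
--     - MINOR: → MINOR
--     - PATCH: → PATCH
--     - sinon → None (pas de bump)
--     """
--     level = None
--
--     for msg in commits:
--         msg = msg.strip()
--
--         if msg.startswith("MAJOR:"):
--             return "MAJOR"
--         elif msg.startswith("MINOR:"):
--             level = "MINOR"
--         elif msg.startswith("PATCH:") and level is None:
--             level = "PATCH"
--
--     return level
-- ===== SOURCE B (Python) =====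
-- def detect_bump_level(commits):
--     if any(m.strip().startswith("MAJOR:") for m in commits):
--         return "MAJOR"
--     if any(m.strip().startswith("MINOR:") for m in commits):
--         return "MINOR"
--     if any(m.strip().startswith("PATCH:") for m in commits):
--         return "PATCH"
--     return None
-- ===== Notes on version B (the rewrite author's own statement) =====
-- stated objective: idiomatic
-- what changed: Replaces the single stateful accumulator loop with three priority-ordered any() scans, one per level.
import Mathlib
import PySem

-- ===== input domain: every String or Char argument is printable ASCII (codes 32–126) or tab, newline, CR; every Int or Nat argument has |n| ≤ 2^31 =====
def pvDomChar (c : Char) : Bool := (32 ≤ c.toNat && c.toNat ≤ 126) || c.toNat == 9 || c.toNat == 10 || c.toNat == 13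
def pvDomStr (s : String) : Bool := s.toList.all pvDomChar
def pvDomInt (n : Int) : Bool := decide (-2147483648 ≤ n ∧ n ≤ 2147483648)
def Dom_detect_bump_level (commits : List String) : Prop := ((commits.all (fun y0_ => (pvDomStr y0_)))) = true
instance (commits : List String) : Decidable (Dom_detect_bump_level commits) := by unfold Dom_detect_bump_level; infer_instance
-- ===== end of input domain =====

-- B replaces A's single stateful accumulator loop with three priority-ordered any-scans (idiomatic; same O(n) cost).

-- ===== PORT A =====
-- A's for-loop with early return and the `level` accumulator, as structural recursion.
def detect_bump_level_loop (commits : List String) (level : Option String) : Option String :=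
  match commits with
  | [] => level
  | msg :: rest =>
    let m := PySem.Str.strip msg
    if PySem.Str.startswith m "MAJOR:" then some "MAJOR"
    else if PySem.Str.startswith m "MINOR:" then detect_bump_level_loop rest (some "MINOR")
    else if PySem.Str.startswith m "PATCH:" && (level == none) then detect_bump_level_loop rest (some "PATCH")
    else detect_bump_level_loop rest level

def detect_bump_level (commits : List String) : Option String :=
  detect_bump_level_loop commits none

-- ===== PORT B =====
def detect_bump_level_alt (commits : List String) : Option String :=
  if commits.any (fun m => PySem.Str.startswith (PySem.Str.strip m) "MAJOR:") then some "MAJOR"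
  else if commits.any (fun m => PySem.Str.startswith (PySem.Str.strip m) "MINOR:") then some "MINOR"
  else if commits.any (fun m => PySem.Str.startswith (PySem.Str.strip m) "PATCH:") then some "PATCH"
  else none

-- ===== PRECONDITION & SPEC =====
def Spec_detect_bump_level (commits : List String) (out : Option String) : Prop := out = detect_bump_level_alt commits
instance (commits : List String) (out : Option String) : Decidable (Spec_detect_bump_level commits out) := by unfold Spec_detect_bump_level; infer_instance

-- ===== CLAIM (what is proved, stated in full; the proofs are below) =====
def Claim_equal_detect_bump_level : Prop := ∀ (commits : List String), Dom_detect_bump_level commits → Spec_detect_bump_level commits (detect_bump_level commits)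

-- ===== LEMMAS AND PROOFS =====

-- Characterisation of A's loop for an arbitrary accumulator value.
theorem detect_bump_level_loop_eq (commits : List String) (level : Option String) :
    detect_bump_level_loop commits level =
      if commits.any (fun m => PySem.Str.startswith (PySem.Str.strip m) "MAJOR:") then some "MAJOR"
      else if commits.any (fun m => PySem.Str.startswith (PySem.Str.strip m) "MINOR:") then some "MINOR"
      else if level ≠ none then level
      else if commits.any (fun m => PySem.Str.startswith (PySem.Str.strip m) "PATCH:") then some "PATCH"
      else none := by
  induction commits generalizing level with
  | nil => simp [detect_bump_level_loop]
  | cons msg rest ih =>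
    simp only [detect_bump_level_loop, List.any_cons]
    by_cases hmaj : PySem.Str.startswith (PySem.Str.strip msg) "MAJOR:" = true
    · simp_all
    · by_cases hmin : PySem.Str.startswith (PySem.Str.strip msg) "MINOR:" = true
      · simp_all
      · by_cases hpat : PySem.Str.startswith (PySem.Str.strip msg) "PATCH:" = true
        · cases level with
          | none => simp_all
          | some l => simp_all
        · simp_all

-- ===== VERDICT (by name: the statement is the Claim_ definition above) =====
theorem detect_bump_level_spec : Claim_equal_detect_bump_level := by
  intro commits _
  unfold Spec_detect_bump_level detect_bump_level detect_bump_level_alt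
  rw [detect_bump_level_loop_eq]
  simp
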